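-- pv_equiv track=rewrite | github.com/deceasedy/py-practice | part1/task1.py | isIcecreamSandwich
-- ===== SOURCE A (Python) =====
-- def isIcecreamSandwich(text):
--
--     # Сэндвич не может быть менее трех символов.
--     if len(text) < 3:
--         return False
--
--     # Достигли ли мы центра?
--     center = False
--     ch = text[0]
--
--
--     for i in range(int((len(text) / 2) + 1)):
--         # Если первый символ сменился, значит мы достигли символов центра.
--         if text[i] == ch:
--             if center: return False
--             center = True
--             ch = text[i]
--
--         # Символы должны быть симметрично равны с разных сторон.
--         if text[i] != text[-i-1]: return False
--
--     # Если цикл завершился, но центр не был достигнут, то строка нам не подходит.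
--     return center
-- ===== SOURCE B (Python) =====
-- def isIcecreamSandwich(text):
--     # A sandwich: at least 3 chars, a full palindrome, and the first
--     # character occurs only at the two ends.
--     if len(text) < 3:
--         return False
--     head = text[0]
--     return text == text[::-1] and sum(c == head for c in text) == 2
-- ===== Notes on version B (the rewrite author's own statement) =====
-- stated objective: simpler
-- what changed: Replaced the index-walking loop with its center/ch flag by a closed characterization: length >= 3, the string equals its reversal, and the first character occurs exactly twice (only at the two ends).
import Mathlib
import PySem

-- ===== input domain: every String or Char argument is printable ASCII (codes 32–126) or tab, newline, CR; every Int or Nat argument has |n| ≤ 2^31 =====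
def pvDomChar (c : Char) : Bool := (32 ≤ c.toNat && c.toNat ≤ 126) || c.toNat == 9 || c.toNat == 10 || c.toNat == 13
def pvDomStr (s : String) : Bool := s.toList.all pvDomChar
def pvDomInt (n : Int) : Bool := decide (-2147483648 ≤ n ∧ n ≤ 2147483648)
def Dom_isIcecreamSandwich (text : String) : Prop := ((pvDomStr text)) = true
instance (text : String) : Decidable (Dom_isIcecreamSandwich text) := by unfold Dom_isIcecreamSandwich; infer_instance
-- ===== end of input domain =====

-- B replaces A's index-walking loop (center/ch flag over half-length range) by a closed
-- characterization: length >= 3, the string equals its reversal, and the first character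
-- occurs exactly twice; objective: simpler.


-- ===== PORT A =====
-- A's for-loop, index list ahead, state (center, ch); early `return False` becomes `false`
def pvALoop (cs : List Char) (idxs : List Int) (center : Bool) (ch : Char) : Bool :=
  match idxs with
  | [] => center
  | i :: rest =>
    match PySem.List.pyGet? cs i, PySem.List.pyGet? cs (-i - 1) with
    | some a, some b =>
      if a == ch then
        if center then false
        else if a != b then false else pvALoop cs rest true ch
      else if a != b then false else pvALoop cs rest center ch
    | _, _ => false  -- unreachable: every loop index i satisfies 0 ≤ i ≤ len/2 < len

def isIcecreamSandwich (text : String) : Bool :=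
  let cs := text.toList
  if (cs.length : Int) < 3 then false
  else
    match PySem.List.pyGet? cs 0 with   -- text[0]
    | none => false  -- unreachable: len ≥ 3
    | some ch =>
      -- int((len(text) / 2) + 1) = len // 2 + 1 (the float division is exact here)
      pvALoop cs (PySem.List.pyRange 0 (PySem.Int.floordiv (cs.length : Int) 2 + 1) 1) false ch

-- ===== PORT B =====
def isIcecreamSandwich_alt (text : String) : Bool :=
  let cs := text.toList
  if (cs.length : Int) < 3 then false
  else
    match PySem.List.pyGet? cs 0, PySem.List.slice? cs none none (-1) with  -- text[0], text[::-1]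
    | some head, some rev =>
      (cs == rev) && ((cs.map (fun c => if c == head then (1 : Int) else 0)).sum == 2)
    | _, _ => false  -- unreachable: len ≥ 3 and step -1 ≠ 0

-- ===== PRECONDITION & SPEC =====
def Spec_isIcecreamSandwich (text : String) (out : Bool) : Prop := out = isIcecreamSandwich_alt text
instance (text : String) (out : Bool) : Decidable (Spec_isIcecreamSandwich text out) := by unfold Spec_isIcecreamSandwich; infer_instance

-- ===== CLAIM (what is proved, stated in full; the proofs are below) =====
def Claim_equal_isIcecreamSandwich : Prop := ∀ (text : String), Dom_isIcecreamSandwich text → Spec_isIcecreamSandwich text (isIcecreamSandwich text)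

-- ===== LEMMAS AND PROOFS =====

-- A's loop returns true iff exactly one index matched ch (none if center was already set)
-- and every index passed the symmetry test.
theorem pvALoop_eq (cs : List Char) (ch : Char) (idxs : List Int)
    (h : ∀ i ∈ idxs, 0 ≤ i ∧ i < (cs.length : Int)) (center : Bool) :
    pvALoop cs idxs center ch =
      (decide (idxs.countP (fun i => PySem.List.pyGet? cs i == some ch) = if center then 0 else 1) &&
       idxs.all (fun i => PySem.List.pyGet? cs i == PySem.List.pyGet? cs (-i - 1))) := by
  induction idxs generalizing center with
  | nil => cases center <;> simp [pvALoop]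
  | cons i rest ih =>
    obtain ⟨h0, h1⟩ := h i (by simp)
    have ha : PySem.List.pyGet? cs i = some cs[i.toNat] :=
      PySem.List.pyGet?_eq_some_getElem cs h0 h1
    have hbne : PySem.List.pyGet? cs (-i - 1) ≠ none := by
      intro hn
      rw [PySem.List.pyGet?_eq_none_iff] at hn
      exact hn (by simp [PySem.Raise.InRange]; omega)
    obtain ⟨b, hb⟩ := Option.ne_none_iff_exists'.mp hbne
    have hrest := fun c => ih (fun j hj => h j (List.mem_cons_of_mem _ hj)) c
    set a := cs[i.toNat] with hadef
    rw [pvALoop, ha, hb]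
    by_cases hach : a = ch
    · subst hach
      cases center
      · by_cases hab : a = b
        · subst hab
          simp [hrest, ha, hb]
        · simp [hab, ha, hb]
      · simp [ha]
    · by_cases hab : a = b
      · subst hab
        simp [hach, hrest, ha, hb]
      · simp [hach, hab, ha, hb]

-- symmetry over indices 0..len/2 is full palindromy
theorem halfsym_iff_reverse (cs : List Char) :
    (∀ j < cs.length / 2 + 1, cs[j]? = cs[cs.length - 1 - j]?) ↔ cs.reverse = cs := by
  constructor
  · intro h
    apply List.ext_getElem?
    intro i
    by_cases hi : i < cs.length
    · rw [List.getElem?_reverse hi]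
      by_cases hh : i < cs.length / 2 + 1
      · exact (h i hh).symm
      · have hj : cs.length - 1 - i < cs.length / 2 + 1 := by omega
        have := h _ hj
        have he : cs.length - 1 - (cs.length - 1 - i) = i := by omega
        rw [he] at this
        exact this
    · rw [List.getElem?_eq_none (by rw [List.length_reverse]; omega), List.getElem?_eq_none (by omega)]
  · intro h j hj
    by_cases hjl : j < cs.length
    · have := List.getElem?_reverse (l := cs) hjl
      rw [h] at this
      exact this
    · rw [List.getElem?_eq_none (by omega), List.getElem?_eq_none (by omega)]

-- for a palindrome of length ≥ 3 starting with c: exactly one index in 0..len/2 holds c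
-- iff c occurs exactly twice in the whole list
theorem count_two_iff (cs : List Char) (c : Char) (h3 : 3 ≤ cs.length)
    (h0 : cs[0]? = some c) (hpal : cs.reverse = cs) :
    ((List.range (cs.length / 2 + 1)).countP (fun j => cs[j]? == some c) = 1) ↔
      cs.count c = 2 := by
  -- decompose cs = c :: mid ++ [c]
  obtain ⟨x, tl, rfl⟩ : ∃ x tl, cs = x :: tl := by
    cases cs with
    | nil => simp at h3
    | cons x tl => exact ⟨x, tl, rfl⟩
  have hx : c = x := by simpa using h0.symm
  subst hx
  have htl : tl ≠ [] := by intro h; subst h; simp at h3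
  obtain ⟨mid, e, rfl⟩ : ∃ mid e, tl = mid ++ [e] :=
    ⟨tl.dropLast, tl.getLast htl, (List.dropLast_append_getLast htl).symm⟩
  have hrev : (c :: (mid ++ [e])).reverse = e :: (mid.reverse ++ [c]) := by simp
  rw [hrev] at hpal
  have hec : c = e := ((List.cons_eq_cons.mp hpal).1).symm
  subst hec
  have hmidpal : mid.reverse = mid :=
    List.append_cancel_right (List.cons_eq_cons.mp hpal).2
  have hmpos : 1 ≤ mid.length := by simp at h3; omega
  have hcount : (c :: (mid ++ [c])).count c = mid.count c + 2 := by
    simp [List.count_append]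
  have hrange : List.range ((c :: (mid ++ [c])).length / 2 + 1)
      = 0 :: (List.range ((mid.length + 2) / 2)).map Nat.succ := by
    rw [show (c :: (mid ++ [c])).length = mid.length + 2 by simp, List.range_succ_eq_map]
  have hp0 : ((c :: (mid ++ [c]))[0]? == some c) = true := by simp
  have key : (∀ j < (mid.length + 2) / 2, ¬((c :: (mid ++ [c]))[j + 1]? == some c) = true)
      ↔ c ∉ mid := by
    constructor
    · intro h hc
      obtain ⟨k, hk, hkc⟩ := List.mem_iff_getElem.mp hc
      by_cases hk2 : k < (mid.length + 2) / 2
      · have ht := h k hk2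
        simp [List.getElem?_append_left (by omega : k < mid.length),
          List.getElem?_eq_getElem hk, hkc] at ht
      · have hk3 : mid.length - 1 - k < (mid.length + 2) / 2 := by omega
        have ht := h (mid.length - 1 - k) hk3
        have hmir : mid[mid.length - 1 - k]? = some mid[k] := by
          have hr := List.getElem?_reverse (l := mid) hk
          rw [hmidpal] at hr
          rw [← hr, List.getElem?_eq_getElem hk]
        simp [List.getElem?_append_left (by omega : mid.length - 1 - k < mid.length),
          hmir, hkc] at ht
    · intro h j hj
      have hjm : j < mid.length := by omega
      simp [List.getElem?_append_left hjm, List.getElem?_eq_getElem hjm]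
      intro hc
      exact h (hc ▸ List.getElem_mem hjm)
  rw [hrange, List.countP_cons, List.countP_map, hcount]
  simp only [hp0, if_true]
  rw [← List.count_eq_zero] at key
  constructor
  · intro h
    have h1 : List.countP ((fun j => (c :: (mid ++ [c]))[j]? == some c) ∘ Nat.succ)
        (List.range ((mid.length + 2) / 2)) = 0 := by omega
    rw [List.countP_eq_zero] at h1
    have h2 := key.mp (fun j hj => h1 j (List.mem_range.mpr hj))
    omega
  · intro h
    have h1 := key.mpr (by omega)
    have h2 : List.countP ((fun j => (c :: (mid ++ [c]))[j]? == some c) ∘ Nat.succ)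
        (List.range ((mid.length + 2) / 2)) = 0 := by
      rw [List.countP_eq_zero]
      intro j hj
      exact h1 j (List.mem_range.mp hj)
    omega

-- Python's text[-j-1] for 0 ≤ j < len is the j-th element from the end
theorem pyGet?_neg_sub_one (cs : List Char) (j : Nat) (hj : j < cs.length) :
    PySem.List.pyGet? cs (-(j : Int) - 1) = cs[cs.length - 1 - j]? := by
  have h1 : (-(j : Int) - 1) = -(((j + 1 : Nat) : Int)) := by push_cast; ring
  rw [h1, PySem.List.pyGet?_neg_natCast cs (j + 1) (by omega) (by omega)]
  congr 1
  omega

theorem main_eq (text : String) : isIcecreamSandwich text = isIcecreamSandwich_alt text := by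
  unfold isIcecreamSandwich isIcecreamSandwich_alt
  set cs := text.toList with hcs
  by_cases h3 : (cs.length : Int) < 3
  · rw [if_pos h3, if_pos h3]
  · rw [if_neg h3, if_neg h3]
    have hn : 3 ≤ cs.length := by omega
    have h0 : PySem.List.pyGet? cs 0 = some cs[0] :=
      PySem.List.pyGet?_eq_some_getElem cs (by omega) (by omega)
    rw [h0, PySem.List.slice?_none_none_neg_one]
    have hfd : PySem.Int.floordiv (cs.length : Int) 2 = ((cs.length / 2 : Nat) : Int) := by
      exact_mod_cast PySem.Int.floordiv_natCast cs.length 2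
    rw [hfd]
    have hrange : PySem.List.pyRange 0 (((cs.length / 2 : Nat) : Int) + 1) 1
        = (List.range (cs.length / 2 + 1)).map (fun k => ((k : Nat) : Int)) := by
      rw [PySem.List.pyRange_one]
      have he : ((cs.length / 2 : Nat) : Int) + 1 - 0 = ((cs.length / 2 + 1 : Nat) : Int) := by
        push_cast; ring
      rw [he, Int.toNat_natCast]
      simp only [zero_add]
    have hbound : ∀ i ∈ (List.range (cs.length / 2 + 1)).map (fun k => ((k : Nat) : Int)),
        0 ≤ i ∧ i < (cs.length : Int) := by
      intro i hi
      simp only [List.mem_map, List.mem_range] at hi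
      obtain ⟨k, hk, rfl⟩ := hi
      refine ⟨Int.natCast_nonneg k, by omega⟩
    rw [hrange]
    show pvALoop cs _ false cs[0] = (cs == cs.reverse && (cs.map (fun c => if c == cs[0] then (1:Int) else 0)).sum == 2)
    rw [pvALoop_eq cs cs[0] _ hbound false]
    simp only [List.countP_map]
    have hcountP : List.countP ((fun i => PySem.List.pyGet? cs i == some cs[0]) ∘ fun k => ((k : Nat) : Int))
        (List.range (cs.length / 2 + 1))
        = List.countP (fun j => cs[j]? == some cs[0]) (List.range (cs.length / 2 + 1)) := by
      apply List.countP_congr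
      intro a ha
      simp [Function.comp, PySem.List.pyGet?_natCast]
    rw [hcountP]
    have hall : (∀ i ∈ (List.range (cs.length / 2 + 1)).map (fun k => ((k : Nat) : Int)),
        PySem.List.pyGet? cs i = PySem.List.pyGet? cs (-i - 1))
        ↔ (∀ j < cs.length / 2 + 1, cs[j]? = cs[cs.length - 1 - j]?) := by
      constructor
      · intro h j hj
        have ht := h ((j : Nat) : Int) (by
          simp only [List.mem_map, List.mem_range]
          exact ⟨j, hj, rfl⟩)
        rwa [PySem.List.pyGet?_natCast, pyGet?_neg_sub_one cs j (by omega)] at ht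
      · intro h i hi
        simp only [List.mem_map, List.mem_range] at hi
        obtain ⟨j, hj, rfl⟩ := hi
        rw [PySem.List.pyGet?_natCast, pyGet?_neg_sub_one cs j (by omega)]
        exact h j hj
    have hsum : (cs.map (fun c => if c = cs[0] then (1 : Int) else 0)).sum
        = ((cs.count cs[0] : Nat) : Int) := by
      rw [show (fun c => if c = cs[0] then (1 : Int) else 0)
          = (fun c => if (c == cs[0]) = true then (1 : Int) else 0) by funext c; simp]
      rw [PySem.List.sum_map_ite_one_zero]
      rfl
    have h00 : cs[0]? = some cs[0] := List.getElem?_eq_getElem (by omega)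
    rw [Bool.eq_iff_iff]
    simp only [Bool.and_eq_true, decide_eq_true_eq, List.all_eq_true, Bool.false_eq_true,
      if_false, beq_iff_eq]
    rw [hall]
    constructor
    · rintro ⟨hc, hs⟩
      have hpal := (halfsym_iff_reverse cs).mp hs
      refine ⟨hpal.symm, ?_⟩
      rw [hsum, (count_two_iff cs cs[0] hn h00 hpal).mp hc]
      norm_num
    · rintro ⟨hpal, hcnt⟩
      have hpal' : cs.reverse = cs := hpal.symm
      refine ⟨?_, (halfsym_iff_reverse cs).mpr hpal'⟩
      apply (count_two_iff cs cs[0] hn h00 hpal').mpr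
      rw [hsum] at hcnt
      exact_mod_cast hcnt

-- ===== VERDICT (by name: the statement is the Claim_ definition above) =====
theorem isIcecreamSandwich_spec : Claim_equal_isIcecreamSandwich := by
  intro text _
  unfold Spec_isIcecreamSandwich
  exact main_eq text
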